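-- pv_equiv track=rewrite | github.com/isotopezzq/SkimFocusNet | testing/test_looping.py | data_reorgan
-- ===== SOURCE A (Python) =====
-- def data_reorgan(datalist):
--     result = []
--     name = []
--     datalist.sort()
--     for data in datalist:
--         name.append(data[0:-7])
--     name = list(set(name))
--     name.sort()
--     for n in name:
--         res = []
--         for data in datalist:
--             if data[0:-7] == n:
--                 res.append(data)
--         result.append(res)
--     return result
-- ===== SOURCE B (Python) =====
-- def data_reorgan(datalist):
--     datalist.sort()
--     groups = {}
--     for data in datalist:
--         groups.setdefault(data[0:-7], []).append(data)
--     return [groups[k] for k in sorted(groups)]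
-- ===== Notes on version B (the rewrite author's own statement) =====
-- stated objective: alternative
-- what changed: Replaces the pass over the whole sorted list for every distinct prefix (one full rescan per distinct prefix) with a single dict-grouping pass over the sorted list followed by emitting groups in sorted-key order.
import Mathlib
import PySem

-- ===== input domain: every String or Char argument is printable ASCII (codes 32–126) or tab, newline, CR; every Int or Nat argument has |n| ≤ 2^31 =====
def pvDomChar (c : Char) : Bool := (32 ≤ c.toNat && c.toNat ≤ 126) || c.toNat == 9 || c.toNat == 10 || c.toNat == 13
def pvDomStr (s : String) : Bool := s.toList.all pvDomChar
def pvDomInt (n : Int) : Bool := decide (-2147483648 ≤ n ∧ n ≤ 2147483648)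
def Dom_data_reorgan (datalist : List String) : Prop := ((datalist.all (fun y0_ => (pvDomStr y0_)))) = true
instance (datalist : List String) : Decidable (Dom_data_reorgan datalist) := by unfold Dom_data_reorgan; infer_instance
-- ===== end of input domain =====

-- B replaces A's per-prefix rescans of the whole list by one dict-grouping pass over the
-- sorted list (an alternative algorithm). Both A and B sort the argument list in place in Python; the
-- equivalence proved here is about the return value (both perform the same mutation).


-- ===== PORT A =====
-- data[0:-7], used by both Pythons
def pvPref (s : String) : String := PySem.Str.slice s (some 0) (some (-7))

def data_reorgan (datalist : List String) : List (List String) :=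
  let dl := PySem.List.sorted datalist (fun x => x) false
  let name := dl.foldl (fun acc data => acc ++ [pvPref data]) []
  let name := PySem.List.sorted (PySem.Set.ofList name) (fun x => x) false
  name.foldl (fun result n =>
    result ++ [dl.foldl (fun res data => if pvPref data == n then res ++ [data] else res) []]) []

-- ===== PORT B =====
def data_reorgan_alt (datalist : List String) : List (List String) :=
  let dl := PySem.List.sorted datalist (fun x => x) false
  let groups := dl.foldl (fun d data => d.modify (pvPref data) [] (fun v => v ++ [data]))
    PySem.Dict.empty
  (PySem.List.sorted groups.keys (fun x => x) false).map (fun k => groups.getD k [])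

-- ===== PRECONDITION & SPEC =====
def Spec_data_reorgan (datalist : List String) (out : List (List String)) : Prop := out = data_reorgan_alt datalist
instance (datalist : List String) (out : List (List String)) : Decidable (Spec_data_reorgan datalist out) := by unfold Spec_data_reorgan; infer_instance

-- ===== CLAIM (what is proved, stated in full; the proofs are below) =====
def Claim_equal_data_reorgan : Prop := ∀ (datalist : List String), Dom_data_reorgan datalist → Spec_data_reorgan datalist (data_reorgan datalist)

-- ===== LEMMAS AND PROOFS =====

-- the keys of B's grouping dict are exactly A's deduplicated prefix list
theorem keys_groups (dl : List String) :
    (dl.foldl (fun d data => d.modify (pvPref data) [] (fun v => v ++ [data]))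
      PySem.Dict.empty).keys = PySem.Set.ofList (dl.map pvPref) := by
  rw [PySem.Dict.keys_foldl_modify_key dl pvPref [] (fun _ data => fun v => v ++ [data])]
  simp [PySem.Set.update, PySem.Set.ofList_eq_foldl, PySem.Dict.keys_empty]

-- each group in B's dict is A's filter of the sorted list by that prefix
theorem getD_groups (dl : List String) (n : String) :
    (dl.foldl (fun d data => d.modify (pvPref data) [] (fun v => v ++ [data]))
      PySem.Dict.empty).getD n []
      = dl.filter (fun data => pvPref data == n) := by
  have h : dl.foldl (fun d data => d.modify (pvPref data) [] (fun v => v ++ [data]))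
        PySem.Dict.empty
      = (dl.map (fun x => (pvPref x, x))).foldl
          (fun d p => d.modify p.1 [] (fun v => v ++ [p.2])) PySem.Dict.empty := by
    rw [List.foldl_map]
  rw [h, PySem.Dict.getD_foldl_modify_append]
  simp [List.filter_map, Function.comp_def]

-- ===== VERDICT (by name: the statement is the Claim_ definition above) =====
theorem data_reorgan_spec : Claim_equal_data_reorgan := by
  intro datalist _
  unfold Spec_data_reorgan data_reorgan data_reorgan_alt
  dsimp only
  rw [PySem.List.foldl_append_singleton_eq_map, keys_groups]
  rw [PySem.List.foldl_append_singleton_eq_map]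
  simp only [List.nil_append]
  apply List.map_congr_left
  intro n _
  rw [PySem.List.foldl_append_if (fun data => pvPref data == n) (fun x => x), getD_groups]
  simp
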